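-- pv_equiv track=rewrite | github.com/Rithvik985/Situated_Learning_Working | backend/routers/generation.py | select_few_shot_examples
-- ===== SOURCE A (Python) =====
-- from typing import List, Optional, Dict, Any
--
-- FEW_SHOT_EXAMPLES = [
--     {
--         "domain": "Embedded Systems",
--         "topic": "Real-time Processing & Hardware Integration",
--         "example": """**Example 1 – Embedded Systems (Real-time Processing & Hardware Integration):**
--
-- Problem Statement:
-- Within your current professional environment, identify a project or system that involves real-time processing, hardware-software integration, or embedded control mechanisms. This could range from IoT device management, industrial automation systems, automotive control units, or telecommunications infrastructure that aligns with embedded systems concepts.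
--
-- Tasks:
-- 1. **System Analysis & Selection**: Document your chosen workplace system, analyzing its real-time requirements, hardware constraints, and current implementation approach
-- 2. **Architecture Design**: Propose an embedded solution using ARM SoC for high-level control and FPGA for hardware acceleration, incorporating your workplace-specific requirements
-- 3. **Implementation Planning**: Design the software architecture in C/C++, define communication protocols, and specify hardware interfaces (AXI, SPI, I2C) based on your system needs
-- 4. **Validation Strategy**: Develop testing procedures and simulation approaches to validate your proposed solution against workplace performance criteria
--
-- Deliverables:
-- - Technical analysis report of your selected workplace system
-- - Detailed design document with architecture diagrams and implementation specifications
-- - Prototype code samples and hardware configuration files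
-- - Testing plan and validation results demonstrating system performance"""
--     },
--     {
--         "domain": "Mechanical System Design",
--         "topic": "Optimization & Analysis",
--         "example": """**Example 2 – Mechanical System Design (Optimization & Analysis):**
--
-- Problem Statement:
-- In your current work environment, identify a mechanical system or component that could benefit from design optimization, performance analysis, or efficiency improvements. This might include HVAC systems, manufacturing equipment, automotive components, or industrial machinery that connects with mechanical design principles.
--
-- Tasks:
-- 1. **System Identification**: Select and document a relevant mechanical system from your workplace, outlining current performance metrics and optimization opportunities
-- 2. **Data Collection & Modeling**: Gather operational data (workplace data preferred, or reliable online sources with attribution) and develop mathematical models of system behavior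
-- 3. **Statistical Analysis**: Apply statistical methods to analyze performance variability, reliability patterns, and identify optimization parameters
-- 4. **Design Optimization**: Implement optimization techniques to enhance efficiency, reduce costs, or improve performance based on your workplace constraints
--
-- Deliverables:
-- - System analysis report with current state assessment and improvement opportunities
-- - Mathematical models and statistical analysis of system performance
-- - Optimization recommendations with supporting calculations and simulations
-- - Implementation plan adapted to your specific workplace context and constraints"""
--     },
--     {
--         "domain": "Software Development",
--         "topic": "Object-Oriented Systems & Database Integration",
--         "example": """**Example 3 – Software Development (Object-Oriented Systems & Database Integration):**
--
-- Problem Statement: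
-- Within your current professional role, identify a software system, application, or data management challenge that could benefit from object-oriented design principles and database optimization. This could involve enterprise applications, web services, mobile apps, or data processing systems currently used in your workplace.
--
-- Tasks:
-- 1. **Requirements Analysis**: Document a relevant software challenge from your work environment, analyzing current system limitations and identifying areas where OOP principles and database management could provide improvements
-- 2. **System Design**: Create an object-oriented architecture design that addresses your workplace requirements, incorporating appropriate design patterns, class hierarchies, and database schema optimization
-- 3. **Implementation**: Develop key components of your system using industry-standard programming languages and database management systems relevant to your workplace technology stack
-- 4. **Testing & Performance**: Implement comprehensive testing strategies and database performance optimization techniques, measuring improvements against your workplace success criteria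
--
-- Deliverables:
-- - Requirements document and current system analysis based on your workplace context
-- - Complete system design with UML diagrams, database schema, and architecture documentation
-- - Working code implementation with proper OOP structure and database integration
-- - Testing results and performance metrics demonstrating system improvements and workplace applicability"""
--     }
-- ]
--
-- def select_few_shot_examples(domains: List[str], topics: List[str]) -> List[Dict]:
--     """Select 3 most relevant few-shot examples based on domains and topics"""
--     # Simple matching logic - can be enhanced with semantic similarity
--     selected = []
--
--     # First, try to match by domain
--     for example in FEW_SHOT_EXAMPLES:
--         if any(domain.lower() in example["domain"].lower() for domain in domains):
--             selected.append(example)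
--             if len(selected) >= 3:
--                 break
--
--     # If we don't have 3 examples, add remaining ones
--     if len(selected) < 3:
--         for example in FEW_SHOT_EXAMPLES:
--             if example not in selected:
--                 selected.append(example)
--                 if len(selected) >= 3:
--                     break
--
--     return selected[:3]
-- ===== SOURCE B (Python) =====
-- from typing import List, Optional, Dict, Any
--
-- FEW_SHOT_EXAMPLES = [
--     {
--         "domain": "Embedded Systems",
--         "topic": "Real-time Processing & Hardware Integration",
--         "example": """**Example 1 – Embedded Systems (Real-time Processing & Hardware Integration):**
--
-- Problem Statement:
-- Within your current professional environment, identify a project or system that involves real-time processing, hardware-software integration, or embedded control mechanisms. This could range from IoT device management, industrial automation systems, automotive control units, or telecommunications infrastructure that aligns with embedded systems concepts.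
--
-- Tasks:
-- 1. **System Analysis & Selection**: Document your chosen workplace system, analyzing its real-time requirements, hardware constraints, and current implementation approach
-- 2. **Architecture Design**: Propose an embedded solution using ARM SoC for high-level control and FPGA for hardware acceleration, incorporating your workplace-specific requirements
-- 3. **Implementation Planning**: Design the software architecture in C/C++, define communication protocols, and specify hardware interfaces (AXI, SPI, I2C) based on your system needs
-- 4. **Validation Strategy**: Develop testing procedures and simulation approaches to validate your proposed solution against workplace performance criteria
--
-- Deliverables:
-- - Technical analysis report of your selected workplace system
-- - Detailed design document with architecture diagrams and implementation specifications
-- - Prototype code samples and hardware configuration files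
-- - Testing plan and validation results demonstrating system performance"""
--     },
--     {
--         "domain": "Mechanical System Design",
--         "topic": "Optimization & Analysis",
--         "example": """**Example 2 – Mechanical System Design (Optimization & Analysis):**
--
-- Problem Statement:
-- In your current work environment, identify a mechanical system or component that could benefit from design optimization, performance analysis, or efficiency improvements. This might include HVAC systems, manufacturing equipment, automotive components, or industrial machinery that connects with mechanical design principles.
--
-- Tasks:
-- 1. **System Identification**: Select and document a relevant mechanical system from your workplace, outlining current performance metrics and optimization opportunities
-- 2. **Data Collection & Modeling**: Gather operational data (workplace data preferred, or reliable online sources with attribution) and develop mathematical models of system behavior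
-- 3. **Statistical Analysis**: Apply statistical methods to analyze performance variability, reliability patterns, and identify optimization parameters
-- 4. **Design Optimization**: Implement optimization techniques to enhance efficiency, reduce costs, or improve performance based on your workplace constraints
--
-- Deliverables:
-- - System analysis report with current state assessment and improvement opportunities
-- - Mathematical models and statistical analysis of system performance
-- - Optimization recommendations with supporting calculations and simulations
-- - Implementation plan adapted to your specific workplace context and constraints"""
--     },
--     {
--         "domain": "Software Development",
--         "topic": "Object-Oriented Systems & Database Integration",
--         "example": """**Example 3 – Software Development (Object-Oriented Systems & Database Integration):**
--
-- Problem Statement: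
-- Within your current professional role, identify a software system, application, or data management challenge that could benefit from object-oriented design principles and database optimization. This could involve enterprise applications, web services, mobile apps, or data processing systems currently used in your workplace.
--
-- Tasks:
-- 1. **Requirements Analysis**: Document a relevant software challenge from your work environment, analyzing current system limitations and identifying areas where OOP principles and database management could provide improvements
-- 2. **System Design**: Create an object-oriented architecture design that addresses your workplace requirements, incorporating appropriate design patterns, class hierarchies, and database schema optimization
-- 3. **Implementation**: Develop key components of your system using industry-standard programming languages and database management systems relevant to your workplace technology stack
-- 4. **Testing & Performance**: Implement comprehensive testing strategies and database performance optimization techniques, measuring improvements against your workplace success criteria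
--
-- Deliverables:
-- - Requirements document and current system analysis based on your workplace context
-- - Complete system design with UML diagrams, database schema, and architecture documentation
-- - Working code implementation with proper OOP structure and database integration
-- - Testing results and performance metrics demonstrating system improvements and workplace applicability"""
--     }
-- ]
--
-- def select_few_shot_examples(domains, topics):
--     """Select 3 few-shot examples: stable index sort by matched-first, then take 3."""
--     keys = [d.lower() for d in domains]
--     flags = [any(k in ex["domain"].lower() for k in keys) for ex in FEW_SHOT_EXAMPLES]
--     order = sorted(range(len(flags)), key=lambda i: not flags[i])
--     return [FEW_SHOT_EXAMPLES[i] for i in order[:3]]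
-- ===== Notes on version B (the rewrite author's own statement) =====
-- stated objective: alternative
-- what changed: Replaces A's two staged scans (collect matching examples, then rescan with a 'not in selected' membership test) by computing a match-flag vector once and stably sorting the example indices matched-first, returning the first 3 indices' examples.
import Mathlib
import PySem

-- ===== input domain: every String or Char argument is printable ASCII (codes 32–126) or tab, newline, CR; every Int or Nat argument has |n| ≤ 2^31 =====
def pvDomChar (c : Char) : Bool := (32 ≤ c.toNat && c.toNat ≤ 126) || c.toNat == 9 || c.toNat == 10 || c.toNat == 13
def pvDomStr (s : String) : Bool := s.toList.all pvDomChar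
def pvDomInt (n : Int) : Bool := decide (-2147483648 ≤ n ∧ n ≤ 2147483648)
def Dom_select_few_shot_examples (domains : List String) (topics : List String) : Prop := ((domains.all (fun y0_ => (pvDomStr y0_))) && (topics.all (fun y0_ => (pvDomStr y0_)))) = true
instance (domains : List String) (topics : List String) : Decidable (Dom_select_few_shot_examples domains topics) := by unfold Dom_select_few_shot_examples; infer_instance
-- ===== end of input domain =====

-- ===== PORT A =====
-- B replaces A's two scans by a stable index sort on a precomputed match-flag vector (objective: alternative); same return value.
def pvEx1 : List (String × String) := [("domain", "Embedded Systems"), ("topic", "Real-time Processing & Hardware Integration"), ("example", "**Example 1 \u2013 Embedded Systems (Real-time Processing & Hardware Integration):**\n\nProblem Statement:\nWithin your current professional environment, identify a project or system that involves real-time processing, hardware-software integration, or embedded control mechanisms. This could range from IoT device management, industrial automation systems, automotive control units, or telecommunications infrastructure that aligns with embedded systems concepts.\n\nTasks:\n1. **System Analysis & Selection**: Document your chosen workplace system, analyzing its real-time requirements, hardware constraints, and current implementation approach\n2. **Architecture Design**: Propose an embedded solution using ARM SoC for high-level control and FPGA for hardware acceleration, incorporating your workplace-specific requirements\n3. **Implementation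 Planning**: Design the software architecture in C/C++, define communication protocols, and specify hardware interfaces (AXI, SPI, I2C) based on your system needs\n4. **Validation Strategy**: Develop testing procedures and simulation approaches to validate your proposed solution against workplace performance criteria\n\nDeliverables:\n- Technical analysis report of your selected workplace system\n- Detailed design document with architecture diagrams and implementation specifications  \n- Prototype code samples and hardware configuration files\n- Testing plan and validation results demonstrating system performance")]
def pvEx2 : List (String × String) := [("domain", "Mechanical System Design"), ("topic", "Optimization & Analysis"), ("example", "**Example 2 \u2013 Mechanical System Design (Optimization & Analysis):**\n\nProblem Statement:\nIn your current work environment, identify a mechanical system or component that could benefit from design optimization, performance analysis, or efficiency improvements. This might include HVAC systems, manufacturing equipment, automotive components, or industrial machinery that connects with mechanical design principles.\n\nTasks:\n1. **System Identification**: Select and document a relevant mechanical system from your workplace, outlining current performance metrics and optimization opportunities\n2. **Data Collection & Modeling**: Gather operational data (workplace data preferred, or reliable online sources with attribution) and develop mathematical models of system behavior\n3. **Statistical Analysis**: Apply statistical methods to analyze performance variability, reliability patterns, and identify optimization parameters\n4. **Design Optimization**: Implement optimization techniques to enhance efficiency, reduce costs, or improve performance based on your workplace constraints\n\nDeliverables:\n-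 System analysis report with current state assessment and improvement opportunities\n- Mathematical models and statistical analysis of system performance\n- Optimization recommendations with supporting calculations and simulations\n- Implementation plan adapted to your specific workplace context and constraints")]
def pvEx3 : List (String × String) := [("domain", "Software Development"), ("topic", "Object-Oriented Systems & Database Integration"), ("example", "**Example 3 \u2013 Software Development (Object-Oriented Systems & Database Integration):**\n\nProblem Statement:\nWithin your current professional role, identify a software system, application, or data management challenge that could benefit from object-oriented design principles and database optimization. This could involve enterprise applications, web services, mobile apps, or data processing systems currently used in your workplace.\n\nTasks:\n1. **Requirements Analysis**: Document a relevant software challenge from your work environment, analyzing current system limitations and identifying areas where OOP principles and database management could provide improvements\n2. **System Design**: Create an object-oriented architecture design that addresses your workplace requirements, incorporating appropriate design patterns, class hierarchies, and database schema optimization\n3. **Implementation**: Develop key components of your system using industry-standard programming languages and database management systems relevant to your workplace technology stack\n4. **Testing & Performance**: Implement comprehensive testing strategies and database performance optimization techniques, measuring improvements against your workplace success criteria\n\nDeliverables:\n- Requirements document and current system analysis based on your workplace context\n- Complete system design with UML diagrams, database schema, and architecture documentation\n- Working code implementation with proper OOP structure and database integration\n- Testing results and performance metrics demonstrating system improvements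 and workplace applicability")]

def pvFewShot : List (List (String × String)) := [pvEx1, pvEx2, pvEx3]

-- any(domain.lower() in ex["domain"].lower() for domain in domains)
-- (exact: every literal ex carries a "domain" key, so the getD default is never used)
def pvMatch (domains : List String) (ex : List (String × String)) : Bool :=
  domains.any (fun domain =>
    PySem.Str.isIn (PySem.Str.lower domain) (PySem.Str.lower ((PySem.Dict.mk ex).getD "domain" "")))

-- first loop: append matching examples, break once len(selected) >= 3
def pvLoopA1 (domains : List String) : List (List (String × String)) → List (List (String × String)) → List (List (String × String))
  | [], selected => selected
  | ex :: rest, selected =>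
    if pvMatch domains ex then
      let selected' := selected ++ [ex]
      if selected'.length ≥ 3 then selected' else pvLoopA1 domains rest selected'
    else pvLoopA1 domains rest selected

-- second loop: append examples not already selected, break once len(selected) >= 3
def pvLoopA2 : List (List (String × String)) → List (List (String × String)) → List (List (String × String))
  | [], selected => selected
  | ex :: rest, selected =>
    if selected.contains ex then pvLoopA2 rest selected
    else
      let selected' := selected ++ [ex]
      if selected'.length ≥ 3 then selected' else pvLoopA2 rest selected'

def select_few_shot_examples (domains : List String) (topics : List String) : List (List (String × String)) :=
  let selected := pvLoopA1 domains pvFewShot []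
  let selected := if selected.length < 3 then pvLoopA2 pvFewShot selected else selected
  selected.take 3

-- ===== PORT B =====
-- flags = [any(k in ex["domain"].lower() for k in keys) for ex in FEW_SHOT_EXAMPLES]
def pvFlags (keys : List String) (exs : List (List (String × String))) : List Bool :=
  exs.map (fun ex =>
    keys.any (fun k => PySem.Str.isIn k (PySem.Str.lower ((PySem.Dict.mk ex).getD "domain" ""))))

-- order = sorted(range(len(flags)), key=lambda i: not flags[i])
-- (the Bool key is ported through Python's False < True order as 0 < 1; flags[i] is in range for i from range())
def pvOrder (flags : List Bool) : List Int :=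
  PySem.List.sorted (PySem.List.pyRange 0 (flags.length : Int) 1)
    (fun i => if PySem.List.pyGetD flags i false then (0 : Int) else 1) false

def select_few_shot_examples_alt (domains : List String) (topics : List String) : List (List (String × String)) :=
  let keys := domains.map PySem.Str.lower
  let order := pvOrder (pvFlags keys pvFewShot)
  (PySem.List.slice order none (some 3)).map (fun i => PySem.List.pyGetD pvFewShot i [])

-- ===== PRECONDITION & SPEC =====
def Spec_select_few_shot_examples (domains : List String) (topics : List String) (out : List (List (String × String))) : Prop := out = select_few_shot_examples_alt domains topics
instance (domains : List String) (topics : List String) (out : List (List (String × String))) : Decidable (Spec_select_few_shot_examples domains topics out) := by unfold Spec_select_few_shot_examples; infer_instance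

-- ===== CLAIM (what is proved, stated in full; the proofs are below) =====
def Claim_equal_select_few_shot_examples : Prop := ∀ (domains : List String) (topics : List String), Dom_select_few_shot_examples domains topics → Spec_select_few_shot_examples domains topics (select_few_shot_examples domains topics)

-- ===== LEMMAS AND PROOFS =====
set_option maxRecDepth 8000

-- B's flag comprehension over lowered keys is the pointwise pvMatch predicate
theorem pvFlags_eq (domains : List String) (exs : List (List (String × String))) :
    pvFlags (domains.map PySem.Str.lower) exs = exs.map (pvMatch domains) := by
  simp [pvFlags, pvMatch, List.any_map, Function.comp_def]

-- the stable index sort on a 3-flag vector, in closed form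
theorem pvOrder_eq (m1 m2 m3 : Bool) :
    pvOrder [m1, m2, m3] =
      ((if m1 then [(0:Int)] else []) ++ (if m2 then [1] else []) ++ (if m3 then [2] else []))
      ++ ((if m1 then [] else [(0:Int)]) ++ (if m2 then [] else [1]) ++ (if m3 then [] else [2])) := by
  cases m1 <;> cases m2 <;> cases m3 <;> decide

-- A on a generic 3-element pairwise-distinct list equals B's sorted-index form.
theorem pv_gen (domains : List String) (e1 e2 e3 : List (String × String))
    (h12 : e1 ≠ e2) (h13 : e1 ≠ e3) (h23 : e2 ≠ e3) :
    (let selected := pvLoopA1 domains [e1, e2, e3] [];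
     let selected := if selected.length < 3 then pvLoopA2 [e1, e2, e3] selected else selected;
     selected.take 3) =
    (PySem.List.slice (pvOrder ([e1, e2, e3].map (pvMatch domains))) none (some 3)).map
      (fun i => PySem.List.pyGetD [e1, e2, e3] i []) := by
  cases hm1 : pvMatch domains e1 <;> cases hm2 : pvMatch domains e2 <;> cases hm3 : pvMatch domains e3 <;>
    simp [pvLoopA1, pvLoopA2, pvOrder_eq, PySem.List.slice, PySem.List.pyGetD,
          hm1, hm2, hm3, h12, h13, h23, Ne.symm h12, Ne.symm h13, Ne.symm h23]

theorem pv_ne12 : pvEx1 ≠ pvEx2 := by decide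
theorem pv_ne13 : pvEx1 ≠ pvEx3 := by decide
theorem pv_ne23 : pvEx2 ≠ pvEx3 := by decide

-- ===== VERDICT (by name: the statement is the Claim_ definition above) =====
theorem select_few_shot_examples_spec : Claim_equal_select_few_shot_examples := by
  intro domains topics _
  unfold Spec_select_few_shot_examples
  have h := pv_gen domains pvEx1 pvEx2 pvEx3 pv_ne12 pv_ne13 pv_ne23
  simpa only [select_few_shot_examples, select_few_shot_examples_alt,
    show pvFewShot = [pvEx1, pvEx2, pvEx3] from rfl, pvFlags_eq] using h
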